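-- pv_equiv track=rewrite | github.com/KaterinaKourti/ny-taxi-project | functions/mapper-q1/handler.py | shuffle_quarters
-- ===== SOURCE A (Python) =====
-- def shuffle_quarters(batch):
--
--     quarters = {
--         'NE': [],
--         'NW': [],
--         'SE': [],
--         'SW': []
--     }
--
--     for row in batch:
--         if row[0] == "NE":
--             quarters['NE'].append(1)
--         elif row[0] == "NW":
--             quarters['NW'].append(1)
--         elif row[0] == "SE":
--             quarters['SE'].append(1)
--         elif row[0] == "SW":
--             quarters['SW'].append(1)
--
--     return quarters
-- ===== SOURCE B (Python) =====
-- def shuffle_quarters(batch):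
--     rows = list(batch)
--     return {q: [1 for r in rows if r[0] == q] for q in ('NE', 'NW', 'SE', 'SW')}
-- ===== Notes on version B (the rewrite author's own statement) =====
-- stated objective: simpler
-- what changed: Replaces the stateful single-pass four-way branch accumulating into a pre-seeded dict by a dict comprehension that performs one independent filtered scan per quarter label.
import Mathlib
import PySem

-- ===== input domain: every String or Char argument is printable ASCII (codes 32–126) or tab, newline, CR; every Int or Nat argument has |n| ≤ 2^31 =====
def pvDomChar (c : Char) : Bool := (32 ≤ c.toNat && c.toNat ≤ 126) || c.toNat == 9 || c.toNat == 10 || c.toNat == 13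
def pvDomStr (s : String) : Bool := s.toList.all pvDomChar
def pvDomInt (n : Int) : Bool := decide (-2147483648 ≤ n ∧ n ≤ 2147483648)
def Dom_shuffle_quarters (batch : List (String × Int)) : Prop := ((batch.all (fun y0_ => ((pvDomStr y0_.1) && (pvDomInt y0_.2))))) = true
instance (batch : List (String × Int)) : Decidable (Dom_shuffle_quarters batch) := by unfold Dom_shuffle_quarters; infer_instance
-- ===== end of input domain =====

-- B replaces A's stateful single-pass four-way branch by one independent filtered scan per quarter label (objective: simpler).

-- ===== PORT A =====
-- A: pre-seeded dict, one pass over batch, appending 1 to the matching bucket.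
-- loop body of A's for-loop, as a named helper
def sqStep (q : PySem.Dict String (List Int)) (row : String × Int) : PySem.Dict String (List Int) :=
  if row.1 == "NE" then q.modify "NE" [] (· ++ [1])
  else if row.1 == "NW" then q.modify "NW" [] (· ++ [1])
  else if row.1 == "SE" then q.modify "SE" [] (· ++ [1])
  else if row.1 == "SW" then q.modify "SW" [] (· ++ [1])
  else q

def shuffle_quarters (batch : List (String × Int)) : List (String × List Int) :=
  let quarters : PySem.Dict String (List Int) :=
    PySem.Dict.ofList [("NE", []), ("NW", []), ("SE", []), ("SW", [])]
  let quarters := batch.foldl sqStep quarters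
  quarters.items

-- ===== PORT B =====
-- B: rows = list(batch); {q: [1 for r in rows if r[0] == q] for q in ('NE','NW','SE','SW')}
def shuffle_quarters_alt (batch : List (String × Int)) : List (String × List Int) :=
  let rows := batch
  ["NE", "NW", "SE", "SW"].map
    (fun q => (q, (rows.filter (fun r => r.1 == q)).map (fun _ => (1 : Int))))

-- ===== PRECONDITION & SPEC =====
def Spec_shuffle_quarters (batch : List (String × Int)) (out : List (String × List Int)) : Prop := out = shuffle_quarters_alt batch
instance (batch : List (String × Int)) (out : List (String × List Int)) : Decidable (Spec_shuffle_quarters batch out) := by unfold Spec_shuffle_quarters; infer_instance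

-- ===== CLAIM (what is proved, stated in full; the proofs are below) =====
def Claim_equal_shuffle_quarters : Prop := ∀ (batch : List (String × Int)), Dom_shuffle_quarters batch → Spec_shuffle_quarters batch (shuffle_quarters batch)

-- ===== LEMMAS AND PROOFS =====

-- Invariant of A's loop: starting from the four seeded buckets a b c d, the fold appends
-- exactly the filtered ones-lists to each bucket, keeping the key order fixed.
theorem shuffle_quarters_loop (batch : List (String × Int)) (a b c d : List Int) :
    (batch.foldl sqStep
      (PySem.Dict.mk [("NE", a), ("NW", b), ("SE", c), ("SW", d)])) =
    PySem.Dict.mk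
      [("NE", a ++ (batch.filter (fun r => r.1 == "NE")).map (fun _ => 1)),
       ("NW", b ++ (batch.filter (fun r => r.1 == "NW")).map (fun _ => 1)),
       ("SE", c ++ (batch.filter (fun r => r.1 == "SE")).map (fun _ => 1)),
       ("SW", d ++ (batch.filter (fun r => r.1 == "SW")).map (fun _ => 1))] := by
  induction batch generalizing a b c d with
  | nil => simp
  | cons row rest ih =>
    rw [List.foldl_cons]
    by_cases h1 : row.1 = "NE"
    · have hstep : sqStep (PySem.Dict.mk [("NE", a), ("NW", b), ("SE", c), ("SW", d)]) row =
          PySem.Dict.mk [("NE", a ++ [1]), ("NW", b), ("SE", c), ("SW", d)] := by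
        simp [sqStep, h1, PySem.Dict.modify, PySem.Dict.contains, PySem.Dict.get?,
          PySem.Dict.getD, PySem.Dict.insert]
      rw [hstep, ih]
      simp [List.filter_cons, h1]
    · by_cases h2 : row.1 = "NW"
      · have hstep : sqStep (PySem.Dict.mk [("NE", a), ("NW", b), ("SE", c), ("SW", d)]) row =
            PySem.Dict.mk [("NE", a), ("NW", b ++ [1]), ("SE", c), ("SW", d)] := by
          simp [sqStep, h1, h2, PySem.Dict.modify, PySem.Dict.contains, PySem.Dict.get?,
            PySem.Dict.getD, PySem.Dict.insert]
        rw [hstep, ih]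
        simp [List.filter_cons, h1, h2]
      · by_cases h3 : row.1 = "SE"
        · have hstep : sqStep (PySem.Dict.mk [("NE", a), ("NW", b), ("SE", c), ("SW", d)]) row =
              PySem.Dict.mk [("NE", a), ("NW", b), ("SE", c ++ [1]), ("SW", d)] := by
            simp [sqStep, h1, h2, h3, PySem.Dict.modify, PySem.Dict.contains, PySem.Dict.get?,
              PySem.Dict.getD, PySem.Dict.insert]
          rw [hstep, ih]
          simp [List.filter_cons, h1, h2, h3]
        · by_cases h4 : row.1 = "SW"
          · have hstep : sqStep (PySem.Dict.mk [("NE", a), ("NW", b), ("SE", c), ("SW", d)]) row =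
                PySem.Dict.mk [("NE", a), ("NW", b), ("SE", c), ("SW", d ++ [1])] := by
              simp [sqStep, h1, h2, h3, h4, PySem.Dict.modify, PySem.Dict.contains,
                PySem.Dict.get?, PySem.Dict.getD, PySem.Dict.insert]
            rw [hstep, ih]
            simp [List.filter_cons, h1, h2, h3, h4]
          · have hstep : sqStep (PySem.Dict.mk [("NE", a), ("NW", b), ("SE", c), ("SW", d)]) row =
                PySem.Dict.mk [("NE", a), ("NW", b), ("SE", c), ("SW", d)] := by
              simp [sqStep, h1, h2, h3, h4]
            rw [hstep, ih]
            simp [List.filter_cons, h1, h2, h3, h4]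

-- ===== VERDICT (by name: the statement is the Claim_ definition above) =====
theorem shuffle_quarters_spec : Claim_equal_shuffle_quarters := by
  intro batch _
  unfold Spec_shuffle_quarters shuffle_quarters shuffle_quarters_alt
  simp only [PySem.Dict.ofList]
  rw [show (PySem.Dict.empty.update [("NE", ([] : List Int)), ("NW", []), ("SE", []), ("SW", [])]) =
      PySem.Dict.mk [("NE", []), ("NW", []), ("SE", []), ("SW", [])] from rfl]
  rw [shuffle_quarters_loop]
  simp
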